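-- pv_equiv track=rewrite | github.com/Seamless-Conversation/seamless-conversation | src/tts/providers/elevenlabs_provider.py | process_word_timings
-- ===== SOURCE A (Python) =====
-- def process_word_timings(characters, end_times):
--     """
--     Combines characters into words and pairs them with their end times.
--
--     Args:
--         characters (list): List of individual characters
--         end_times (list): List of end times for each character
--
--     Returns:
--         list: List of tuples containing (word, end_time)
--     """
--     if len(characters) != len(end_times):
--         raise ValueError("Characters and end times must have the same length")
--
--     words = []
--     word_timings = []
--     current_word = []
--
--     for i, (char, time) in enumerate(zip(characters, end_times)):
--         if char == ' ':
--             if current_word: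
--                 word = ''.join(current_word)
--                 words.append((word, end_times[i-1]))
--                 current_word = []
--         else:
--             current_word.append(char)
--
--     if current_word:
--         word = ''.join(current_word)
--         words.append((word, end_times[-1]))
--
--     return words
-- ===== SOURCE B (Python) =====
-- def word_starts(characters):
--     n = len(characters)
--     return [i for i in range(n)
--             if characters[i] != ' ' and (i == 0 or characters[i-1] == ' ')]
--
--
-- def word_ends(characters):
--     n = len(characters)
--     return [i for i in range(n)
--             if characters[i] != ' ' and (i == n - 1 or characters[i+1] == ' ')]
--
--
-- def process_word_timings(characters, end_times):
--     """Combines characters into words and pairs them with their end times."""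
--     if len(characters) != len(end_times):
--         raise ValueError("Characters and end times must have the same length")
--
--     return [(''.join(characters[s:e+1]), end_times[e])
--             for s, e in zip(word_starts(characters), word_ends(characters))]
-- ===== Notes on version B (the rewrite author's own statement) =====
-- stated objective: alternative
-- what changed: Replaces A's streaming loop with its current_word buffer and end_times[i-1]/[-1] lookups by staged index passes: compute the list of word-start indices and word-end indices by boundary tests on each position (non-space whose neighbour is a space or the list edge), zip them into spans, and map each span to (joined slice, end_times[end]).
import Mathlib
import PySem

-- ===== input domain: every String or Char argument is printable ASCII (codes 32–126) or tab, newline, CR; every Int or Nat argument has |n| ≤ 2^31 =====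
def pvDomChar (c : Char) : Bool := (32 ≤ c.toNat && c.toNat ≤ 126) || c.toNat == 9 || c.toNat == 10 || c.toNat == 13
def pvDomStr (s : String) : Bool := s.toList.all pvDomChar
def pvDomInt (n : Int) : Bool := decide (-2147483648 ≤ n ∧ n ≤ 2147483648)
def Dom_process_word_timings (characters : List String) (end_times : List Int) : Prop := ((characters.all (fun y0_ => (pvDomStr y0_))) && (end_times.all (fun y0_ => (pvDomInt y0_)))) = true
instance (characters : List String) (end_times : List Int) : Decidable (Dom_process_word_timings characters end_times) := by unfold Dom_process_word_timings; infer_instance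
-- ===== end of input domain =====

-- B replaces A's streaming loop (current_word buffer, end_times[i-1]/[-1]) by staged index
-- passes: boundary tests yield the word-start and word-end index lists, which are zipped into
-- spans and mapped to (joined slice, end_times[end]) — alternative decomposition, same O(n) cost.
-- Return-value equivalence on inputs of equal length (A raises ValueError otherwise).

-- ===== PORT A =====
-- the 'for i, (char, time) in enumerate(zip(...))' loop, state = (words, current_word);
-- end_times[i-1] / end_times[-1] via pyGet?; the .getD 0 default is never reached on the
-- admitted inputs (the index is always in range when it is evaluated)
def pwtLoop (end_times : List Int) : List (String × Int) → Nat → List (String × Int) → List String → List (String × Int) × List String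
  | [], _, words, cur => (words, cur)
  | (c, _) :: rest, i, words, cur =>
    if c = " " then
      if cur ≠ [] then
        pwtLoop end_times rest (i + 1) (words ++ [(PySem.Str.join "" cur, (PySem.List.pyGet? end_times ((i : Int) - 1)).getD 0)]) []
      else
        pwtLoop end_times rest (i + 1) words cur
    else
      pwtLoop end_times rest (i + 1) words (cur ++ [c])

def process_word_timings (characters : List String) (end_times : List Int) : List (String × Int) :=
  if characters.length ≠ end_times.length then []  -- Python raises ValueError here (outside Pre_)
  else
    let r := pwtLoop end_times (characters.zip end_times) 0 [] []
    if r.2 ≠ [] then r.1 ++ [(PySem.Str.join "" r.2, (PySem.List.pyGet? end_times (-1)).getD 0)]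
    else r.1

-- ===== PORT B =====
-- '[i for i in range(n) if characters[i] != ' ' and (i == 0 or characters[i-1] == ' ')]';
-- all indexing is in range, so plain getD is exact here
def pwtStartP (cs : List String) (i : Nat) : Bool :=
  (!(cs.getD i "" == " ")) && (i == 0 || cs.getD (i - 1) "" == " ")

def pwtEndP (cs : List String) (i : Nat) : Bool :=
  (!(cs.getD i "" == " ")) && (i == cs.length - 1 || cs.getD (i + 1) "" == " ")

def pwtStarts (cs : List String) : List Nat := (List.range cs.length).filter (pwtStartP cs)

def pwtEnds (cs : List String) : List Nat := (List.range cs.length).filter (pwtEndP cs)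

def process_word_timings_alt (characters : List String) (end_times : List Int) : List (String × Int) :=
  if characters.length ≠ end_times.length then []  -- Python raises ValueError here (outside Pre_)
  else
    ((pwtStarts characters).zip (pwtEnds characters)).map
      (fun p => (PySem.Str.join "" (PySem.List.slice characters (some (p.1 : Int)) (some ((p.2 : Int) + 1))),
                 (PySem.List.pyGet? end_times (p.2 : Int)).getD 0))

-- ===== PRECONDITION & SPEC =====
-- A (and B) raise ValueError when the two lists differ in length; Pre_ excludes exactly those inputs.
def Pre_process_word_timings (characters : List String) (end_times : List Int) : Prop :=
  characters.length = end_times.length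
instance (characters : List String) (end_times : List Int) : Decidable (Pre_process_word_timings characters end_times) := by unfold Pre_process_word_timings; infer_instance
def pvWitness_process_word_timings : List String × List Int := (["h", "i", " ", "o", "k"], [1, 2, 3, 4, 5])

def Spec_process_word_timings (characters : List String) (end_times : List Int) (out : List (String × Int)) : Prop := out = process_word_timings_alt characters end_times
instance (characters : List String) (end_times : List Int) (out : List (String × Int)) : Decidable (Spec_process_word_timings characters end_times out) := by unfold Spec_process_word_timings; infer_instance

-- ===== CLAIM (what is proved, stated in full; the proofs are below) =====
def Claim_equal_process_word_timings : Prop := ∀ (characters : List String) (end_times : List Int), Dom_process_word_timings characters end_times → Pre_process_word_timings characters end_times → Spec_process_word_timings characters end_times (process_word_timings characters end_times)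

-- ===== LEMMAS AND PROOFS =====

-- reference function both ports are reduced to: pending non-space chars `cur` whose last
-- char's end time is `lt`
def pwtW : List (String × Int) → List String → Int → List (String × Int)
  | [], cur, lt => if cur = [] then [] else [(PySem.Str.join "" cur, lt)]
  | (c, t) :: rest, cur, lt =>
    if c = " " then
      if cur = [] then pwtW rest [] lt
      else (PySem.Str.join "" cur, lt) :: pwtW rest [] lt
    else
      pwtW rest (cur ++ [c]) t

theorem pwtW_lt_irrel : ∀ (l : List (String × Int)) (a b : Int), pwtW l [] a = pwtW l [] b := by
  intro l
  induction l with
  | nil => intro a b; simp [pwtW]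
  | cons p rest ih =>
    intro a b
    obtain ⟨c, t⟩ := p
    by_cases hc : c = " " <;> simp [pwtW, hc, ih a b]

theorem pwtW_run : ∀ (g : List (String × Int)), g ≠ [] → (∀ q ∈ g, q.1 ≠ " ") →
    ∀ (rest : List (String × Int)) (cur : List String) (lt : Int) (d : String × Int),
      pwtW (g ++ rest) cur lt = pwtW rest (cur ++ g.map Prod.fst) ((g.getLastD d).2) := by
  intro g
  induction g with
  | nil => intro h; exact absurd rfl h
  | cons p g' ih =>
    intro _ h rest cur lt d
    obtain ⟨c, t⟩ := p
    have hc : c ≠ " " := h (c, t) (List.mem_cons_self ..)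
    simp only [List.cons_append, pwtW, hc, if_neg hc]
    cases g' with
    | nil => simp [List.getLastD]
    | cons q g'' =>
      have := ih (by simp) (fun q hq => h q (List.mem_cons_of_mem _ hq)) rest (cur ++ [c]) t d
      rw [this]
      simp [List.getLastD_cons]

-- head of dropWhile fails the predicate
theorem pwtDropWhile_head {α : Type} (p : α → Bool) :
    ∀ (l : List α) (q : α) (r : List α), l.dropWhile p = q :: r → p q = false := by
  intro l
  induction l with
  | nil => intro q r h; simp [List.dropWhile] at h
  | cons x xs ih =>
    intro q r h
    by_cases hx : p x = true
    · rw [List.dropWhile_cons_of_pos hx] at h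
      exact ih q r h
    · rw [List.dropWhile_cons_of_neg hx] at h
      cases h
      simpa using hx

-- index shift through an appended prefix
theorem pwtGetD_shift (pre rest : List String) (j : Nat) :
    (pre ++ rest).getD (pre.length + j) "" = rest.getD j "" := by
  rw [List.getD_eq_getElem?_getD, List.getD_eq_getElem?_getD,
    List.getElem?_append_right (Nat.le_add_right _ _)]
  simp

-- B-side: shift lemmas for the boundary filters
theorem pwtEnds_shift (pre rest : List String) :
    (List.range rest.length).filter (fun j => pwtEndP (pre ++ rest) (pre.length + j))
      = pwtEnds rest := by
  apply List.filter_congr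
  intro j hj
  have hjm : j < rest.length := List.mem_range.mp hj
  unfold pwtEndP
  have h1 := pwtGetD_shift pre rest j
  have h2 : (pre ++ rest).getD (pre.length + j + 1) "" = rest.getD (j + 1) "" := by
    rw [Nat.add_assoc]; exact pwtGetD_shift pre rest (j + 1)
  have h3 : ((pre.length + j == (pre ++ rest).length - 1) : Bool) = (j == rest.length - 1) := by
    simp only [List.length_append]
    by_cases h : j = rest.length - 1 <;> simp [h] <;> omega
  rw [h1, h2, h3]

theorem pwtStarts_shift (pre rest : List String)
    (hb : pre = [] ∨ rest = [] ∨ (pre ++ rest).getD (pre.length - 1) "" = " " ∨ rest.getD 0 "" = " ") :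
    (List.range rest.length).filter (fun j => pwtStartP (pre ++ rest) (pre.length + j))
      = pwtStarts rest := by
  rcases hb with hb | hb | hb | hb
  · subst hb; simp [pwtStarts]
  · subst hb; simp [pwtStarts]
  all_goals
    apply List.filter_congr
    intro j hj
    have hjm : j < rest.length := List.mem_range.mp hj
    unfold pwtStartP
    have h1 := pwtGetD_shift pre rest j
    rw [h1]
    cases j with
    | zero =>
      simp only [Nat.add_zero]
      rw [hb]
      simp
    | succ i =>
      have h2 : (pre ++ rest).getD (pre.length + (i + 1) - 1) "" = rest.getD i "" := by
        rw [show pre.length + (i + 1) - 1 = pre.length + i from by omega]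
        exact pwtGetD_shift pre rest i
      rw [h2]
      have h3 : ((pre.length + (i + 1) == 0) : Bool) = false := by simp
      rw [h3]
      simp

-- the prefix-word filters: a nonempty all-non-space prefix followed by a space (or nothing)
theorem pwtElem_word (w rest : List String) (hns : ∀ s ∈ w, s ≠ " ") (j : Nat)
    (h : j < w.length) : ((w ++ rest)[j]?).getD "" ≠ " " := by
  rw [List.getElem?_append_left h, List.getElem?_eq_getElem h]
  exact hns _ (List.getElem_mem h)

theorem pwtStarts_word (w rest : List String) (hw : w ≠ []) (hns : ∀ s ∈ w, s ≠ " ") :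
    (List.range w.length).filter (pwtStartP (w ++ rest)) = [0] := by
  obtain ⟨k', hk⟩ : ∃ k', w.length = k' + 1 := ⟨w.length - 1, by cases w with
    | nil => exact absurd rfl hw
    | cons a l => simp⟩
  rw [hk, List.range_succ_eq_map,
    List.filter_cons_of_pos (by
      simp [pwtStartP]
      exact pwtElem_word w rest hns 0 (by omega)),
    List.filter_map]
  have hnil : (List.range k').filter (pwtStartP (w ++ rest) ∘ (· + 1)) = [] := by
    rw [List.filter_eq_nil_iff]
    intro i hi
    have hik : i + 1 < w.length := by have := List.mem_range.mp hi; omega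
    simp [pwtStartP]
    intro _
    exact pwtElem_word w rest hns i (by omega)
  rw [hnil]
  simp

theorem pwtEnds_word (w rest : List String) (hw : w ≠ []) (hns : ∀ s ∈ w, s ≠ " ")
    (hr : rest = [] ∨ rest.getD 0 "" = " ") :
    (List.range w.length).filter (pwtEndP (w ++ rest)) = [w.length - 1] := by
  obtain ⟨k', hk⟩ : ∃ k', w.length = k' + 1 := ⟨w.length - 1, by cases w with
    | nil => exact absurd rfl hw
    | cons a l => simp⟩
  rw [hk, List.range_succ, List.filter_append]
  have hnil : (List.range k').filter (pwtEndP (w ++ rest)) = [] := by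
    rw [List.filter_eq_nil_iff]
    intro i hi
    have hik : i < k' := List.mem_range.mp hi
    simp [pwtEndP]
    intro _
    exact ⟨by omega, pwtElem_word w rest hns (i + 1) (by omega)⟩
  have hlast : pwtEndP (w ++ rest) k' = true := by
    simp [pwtEndP]
    refine ⟨pwtElem_word w rest hns k' (by omega), ?_⟩
    rcases hr with hr | hr
    · subst hr
      left
      simp [hk]
    · right
      have h2 : ((w ++ rest)[k' + 1]?).getD "" = rest.getD 0 "" := by
        rw [show k' + 1 = w.length + 0 from by omega, List.getElem?_append_right (by omega)]
        simp [List.getD_eq_getElem?_getD]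
      rw [h2, hr]
  rw [hnil, List.filter_cons_of_pos hlast]
  simp [hk]

-- the span-to-tuple map, with slice/pyGet? already reduced to drop/take/getElem?
def pwtG (cs : List String) (ts : List Int) (p : Nat × Nat) : String × Int :=
  (PySem.Str.join "" ((cs.drop p.1).take (p.2 + 1 - p.1)), (ts[p.2]?).getD 0)

theorem pwtB_G : ∀ (n : Nat) (cs : List String) (ts : List Int), cs.length ≤ n →
    cs.length = ts.length → ∀ (lt : Int),
    ((pwtStarts cs).zip (pwtEnds cs)).map (pwtG cs ts) = pwtW (cs.zip ts) [] lt := by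
  intro n
  induction n with
  | zero =>
    intro cs ts hle hlen lt
    have hcs : cs = [] := List.length_eq_zero_iff.mp (Nat.le_zero.mp hle)
    subst hcs
    simp [pwtStarts, pwtEnds, pwtW]
  | succ n ih =>
    intro cs ts hle hlen lt
    cases cs with
    | nil => simp [pwtStarts, pwtEnds, pwtW]
    | cons c cs0 =>
    by_cases hc : c = " "
    · -- head is a space: everything shifts by one
      cases ts with
      | nil => simp at hlen
      | cons t ts0 =>
      have hlen0 : cs0.length = ts0.length := by simpa using hlen
      have hL : (c :: cs0).length = 1 + cs0.length := by simp [Nat.add_comm]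
      have hs : pwtStarts (c :: cs0) = (pwtStarts cs0).map (1 + ·) := by
        unfold pwtStarts
        rw [hL, List.range_add, List.filter_append, List.filter_map]
        have h0 : (List.range 1).filter (pwtStartP (c :: cs0)) = [] := by
          simp [List.range_succ, pwtStartP, hc]
        have h1 : (List.range cs0.length).filter (pwtStartP (c :: cs0) ∘ (1 + ·)) = pwtStarts cs0 := by
          have := pwtStarts_shift [c] cs0 (by right; right; left; simp [hc])
          simpa [Function.comp] using this
        rw [h0, h1]
        simp [pwtStarts]
      have he : pwtEnds (c :: cs0) = (pwtEnds cs0).map (1 + ·) := by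
        unfold pwtEnds
        rw [hL, List.range_add, List.filter_append, List.filter_map]
        have h0 : (List.range 1).filter (pwtEndP (c :: cs0)) = [] := by
          simp [List.range_succ, pwtEndP, hc]
        have h1 : (List.range cs0.length).filter (pwtEndP (c :: cs0) ∘ (1 + ·)) = pwtEnds cs0 := by
          have := pwtEnds_shift [c] cs0
          simpa [Function.comp] using this
        rw [h0, h1]
        simp [pwtEnds]
      have hfun : pwtG (c :: cs0) (t :: ts0) ∘ Prod.map (1 + ·) (1 + ·) = pwtG cs0 ts0 := by
        funext p
        obtain ⟨s, e⟩ := p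
        simp only [Function.comp, Prod.map, pwtG]
        rw [show 1 + s = s + 1 from by omega, List.drop_succ_cons,
          show 1 + e + 1 - (s + 1) = e + 1 - s from by omega,
          show 1 + e = e + 1 from by omega, List.getElem?_cons_succ]
      rw [hs, he, List.zip_map, List.map_map, hfun,
        ih cs0 ts0 (by simp at hle; omega) hlen0 lt]
      simp [pwtW, hc]
    · -- head starts a word: peel the whole first run
      have hPc : (!(c == " ")) = true := by simp [hc]
      have hWc : (c :: cs0).takeWhile (fun s => !(s == " ")) = c :: cs0.takeWhile (fun s => !(s == " ")) :=
        List.takeWhile_cons_of_pos hPc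
      generalize hWdef : (c :: cs0).takeWhile (fun s => !(s == " ")) = W at hWc
      generalize hRdef : (c :: cs0).dropWhile (fun s => !(s == " ")) = R
      have hWR : W ++ R = c :: cs0 := by rw [← hWdef, ← hRdef]; exact List.takeWhile_append_dropWhile
      have hw : W ≠ [] := by rw [hWc]; simp
      have hk1 : 1 ≤ W.length := by
        cases W with
        | nil => exact absurd rfl hw
        | cons a l => simp
      have hns : ∀ s ∈ W, s ≠ " " := by
        intro s hs
        rw [← hWdef] at hs
        have := List.mem_takeWhile_imp hs
        simpa using this
      have hr : R = [] ∨ R.getD 0 "" = " " := by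
        cases hR : R with
        | nil => exact Or.inl rfl
        | cons q r =>
          right
          have hqf := pwtDropWhile_head (fun s => !(s == " ")) (c :: cs0) q r (by rw [hRdef, hR])
          simp at hqf
          simpa [hR] using hqf
      have hlen2 : W.length + R.length = (c :: cs0).length := by
        rw [← hWR, List.length_append]
      have hcl : (c :: cs0).length = cs0.length + 1 := by simp
      have hle' : cs0.length + 1 ≤ n + 1 := by simpa using hle
      have hkts : W.length ≤ ts.length := by omega
      have hs : pwtStarts (c :: cs0) = 0 :: (pwtStarts R).map (W.length + ·) := by
        unfold pwtStarts
        rw [← hWR, List.length_append, List.range_add, List.filter_append, List.filter_map,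
          pwtStarts_word W R hw hns]
        have h1 : (List.range R.length).filter (pwtStartP (W ++ R) ∘ (W.length + ·)) = pwtStarts R := by
          have := pwtStarts_shift W R (by
            rcases hr with h | h
            · exact Or.inr (Or.inl h)
            · exact Or.inr (Or.inr (Or.inr h)))
          simpa [Function.comp] using this
        rw [h1]
        simp [pwtStarts]
      have he : pwtEnds (c :: cs0) = (W.length - 1) :: (pwtEnds R).map (W.length + ·) := by
        unfold pwtEnds
        rw [← hWR, List.length_append, List.range_add, List.filter_append, List.filter_map,
          pwtEnds_word W R hw hns hr]
        have h1 : (List.range R.length).filter (pwtEndP (W ++ R) ∘ (W.length + ·)) = pwtEnds R := by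
          have := pwtEnds_shift W R
          simpa [Function.comp] using this
        rw [h1]
        simp [pwtEnds]
      have hhead : pwtG (c :: cs0) ts (0, W.length - 1) = (PySem.Str.join "" W, (ts[W.length - 1]?).getD 0) := by
        simp only [pwtG]
        rw [show W.length - 1 + 1 - 0 = W.length from by omega, List.drop_zero,
          ← hWR, List.take_left]
      have hfun : pwtG (c :: cs0) ts ∘ Prod.map (W.length + ·) (W.length + ·) = pwtG R (ts.drop W.length) := by
        funext p
        obtain ⟨s, e⟩ := p
        simp only [Function.comp, Prod.map, pwtG]
        rw [show ((c :: cs0).drop (W.length + s)) = R.drop s from by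
            rw [← hWR, List.drop_append]; simp,
          show W.length + e + 1 - (W.length + s) = e + 1 - s from by omega,
          ← List.getElem?_drop]
      have hRlen : R.length ≤ n := by omega
      have hRts : R.length = (ts.drop W.length).length := by
        simp [List.length_drop]
        omega
      rw [hs, he, List.zip_cons_cons, List.map_cons, List.zip_map, List.map_map, hfun,
        ih R (ts.drop W.length) hRlen hRts lt, hhead]
      -- right-hand side: split the zip at the first run
      have hz : (c :: cs0).zip ts = W.zip (ts.take W.length) ++ R.zip (ts.drop W.length) := by
        conv_lhs => rw [← hWR, ← List.take_append_drop W.length ts]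
        exact List.zip_append (by simp [List.length_take]; omega)
      rw [hz]
      have hglen : (W.zip (ts.take W.length)).length = W.length := by
        simp [List.length_zip, List.length_take]
        omega
      have hgne : W.zip (ts.take W.length) ≠ [] := by
        intro h
        rw [h] at hglen
        simp at hglen
        omega
      have hgns : ∀ q ∈ W.zip (ts.take W.length), q.1 ≠ " " := by
        intro q hq
        obtain ⟨a, b⟩ := q
        exact hns a (List.of_mem_zip hq).1
      rw [pwtW_run (W.zip (ts.take W.length)) hgne hgns (R.zip (ts.drop W.length)) [] lt ("", 0)]
      have hmap : (W.zip (ts.take W.length)).map Prod.fst = W :=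
        List.map_fst_zip (by simp [List.length_take]; omega)
      have htlt : W.length - 1 < (ts.take W.length).length := by
        simp [List.length_take]
        omega
      have htime : (((W.zip (ts.take W.length)).getLastD ("", 0))).2 = (ts[W.length - 1]?).getD 0 := by
        have hWlt : W.length - 1 < W.length := by omega
        have h1 : (W.zip (ts.take W.length))[W.length - 1]? =
            some (W[W.length - 1]'hWlt, (ts.take W.length)[W.length - 1]'htlt) :=
          List.getElem?_zip_eq_some.mpr
            ⟨List.getElem?_eq_getElem hWlt, List.getElem?_eq_getElem htlt⟩
        have h2 : ts[W.length - 1]? = some ((ts.take W.length)[W.length - 1]'htlt) := by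
          rw [← List.getElem?_take_of_lt (show W.length - 1 < W.length from by omega)]
          exact List.getElem?_eq_getElem htlt
        rw [List.getLastD_eq_getLast?, List.getLast?_eq_getElem?, hglen, h1, h2]
        rfl
      rw [List.nil_append, hmap, htime]
      cases hzr : R.zip (ts.drop W.length) with
      | nil =>
        have hRnil : R = [] := by
          cases R with
          | nil => rfl
          | cons q r =>
            exfalso
            cases hts0 : ts.drop W.length with
            | nil => rw [hts0] at hRts; simp at hRts
            | cons u v => rw [hts0] at hzr; simp at hzr
        subst hRnil
        simp [pwtW, hw]
      | cons q zr' =>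
        obtain ⟨c', t'⟩ := q
        have hq : c' = " " := by
          cases hR : R with
          | nil => rw [hR] at hzr; simp at hzr
          | cons a r =>
            cases hts0 : ts.drop W.length with
            | nil =>
              rw [hR, hts0] at hzr
              simp at hzr
            | cons u v =>
              rw [hR, hts0] at hzr
              simp only [List.zip_cons_cons, List.cons.injEq, Prod.mk.injEq] at hzr
              obtain ⟨⟨ha, -⟩, -⟩ := hzr
              rcases hr with h | h
              · rw [hR] at h; simp at h
              · rw [hR] at h
                simp only [List.getD_cons_zero] at h
                rw [← ha]
                exact h
        rw [show pwtW (((c', t') :: zr')) W ((ts[W.length - 1]?).getD 0)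
            = (PySem.Str.join "" W, (ts[W.length - 1]?).getD 0) :: pwtW zr' [] ((ts[W.length - 1]?).getD 0) from by
          simp [pwtW, hq, hw]]
        have hl : pwtW ((c', t') :: zr') [] lt = pwtW zr' [] ((ts[W.length - 1]?).getD 0) := by
          rw [show pwtW ((c', t') :: zr') [] lt = pwtW zr' [] lt from by simp [pwtW, hq]]
          exact pwtW_lt_irrel zr' lt _
        rw [hl]

-- B's span map computes pwtW
theorem pwtB_eq : ∀ (n : Nat) (cs : List String) (ts : List Int), cs.length ≤ n →
    cs.length = ts.length → ∀ (lt : Int),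
    ((pwtStarts cs).zip (pwtEnds cs)).map
      (fun p => (PySem.Str.join "" (PySem.List.slice cs (some (p.1 : Int)) (some ((p.2 : Int) + 1))),
                 (PySem.List.pyGet? ts (p.2 : Int)).getD 0))
      = pwtW (cs.zip ts) [] lt := by
  intro n cs ts hle hlen lt
  have hF : (fun p : Nat × Nat =>
      (PySem.Str.join "" (PySem.List.slice cs (some (p.1 : Int)) (some ((p.2 : Int) + 1))),
       (PySem.List.pyGet? ts (p.2 : Int)).getD 0)) = pwtG cs ts := by
    funext p
    rw [show ((p.2 : Int) + 1) = ((p.2 + 1 : Nat) : Int) from by push_cast; ring]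
    rw [PySem.List.slice_natCast, PySem.List.pyGet?_natCast]
    rfl
  rw [hF]
  exact pwtB_G n cs ts hle hlen lt

-- A's loop computes pwtW: k counts processed pairs, lt is the time of the pair at k-1 when cur ≠ []
theorem pwtLoop_eq (characters : List String) (end_times : List Int)
    (hlen : characters.length = end_times.length) :
    ∀ (l : List (String × Int)) (k : Nat) (words : List (String × Int)) (cur : List String) (lt : Int),
      l = (characters.zip end_times).drop k →
      k ≤ (characters.zip end_times).length →
      (cur ≠ [] → 1 ≤ k ∧ (PySem.List.pyGet? end_times ((k : Int) - 1)).getD 0 = lt) →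
      (let r := pwtLoop end_times l k words cur;
       if r.2 ≠ [] then r.1 ++ [(PySem.Str.join "" r.2, (PySem.List.pyGet? end_times (-1)).getD 0)] else r.1)
      = words ++ pwtW l cur lt := by
  intro l
  induction l with
  | nil =>
    intro k words cur lt hdrop hk hcur
    by_cases hc : cur = []
    · subst hc; simp [pwtLoop, pwtW]
    · obtain ⟨hk1, hlt⟩ := hcur hc
      have hzlen : (characters.zip end_times).length = end_times.length := by
        simp [List.length_zip, hlen]
      have hke : k = end_times.length := by
        have : (characters.zip end_times).length ≤ k := by
          by_contra hlt'
          push_neg at hlt'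
          have := List.drop_eq_nil_iff.mp hdrop.symm
          omega
        omega
      have hne : end_times ≠ [] := by
        intro h; rw [h] at hke; simp at hke; omega
      have hneg : PySem.List.pyGet? end_times (-1) = end_times[end_times.length - 1]? := by
        rw [PySem.List.pyGet?_neg_one, List.getLast?_eq_getElem?]
      have hpos : (PySem.List.pyGet? end_times ((k : Int) - 1)) = end_times[end_times.length - 1]? := by
        have : ((k : Int) - 1) = ((k - 1 : Nat) : Int) := by omega
        rw [this, PySem.List.pyGet?_natCast]
        congr 1
        omega
      simp only [pwtLoop, pwtW, if_neg hc, hc, ne_eq, not_false_iff, if_true, if_false]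
      rw [hneg, ← hpos, hlt]
  | cons p rest ih =>
    intro k words cur lt hdrop hk hcur
    obtain ⟨c, t⟩ := p
    have hrest : rest = (characters.zip end_times).drop (k + 1) := by
      have : (characters.zip end_times).drop (k + 1) = ((characters.zip end_times).drop k).drop 1 := by
        rw [List.drop_drop]
      rw [this, ← hdrop]
      rfl
    have hklt : k < (characters.zip end_times).length := by
      by_contra h
      push_neg at h
      have : (characters.zip end_times).drop k = [] := List.drop_eq_nil_of_le h
      rw [this] at hdrop; exact absurd hdrop (by simp)
    have hk1 : k + 1 ≤ (characters.zip end_times).length := hklt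
    have hzk : (characters.zip end_times)[k]? = some (c, t) := by
      have h0 : ((characters.zip end_times).drop k)[0]? = some (c, t) := by
        rw [← hdrop]; rfl
      rw [List.getElem?_drop] at h0
      simpa using h0
    have hklt' : k < end_times.length := by
      have : (characters.zip end_times).length = end_times.length := by
        simp [List.length_zip, hlen]
      omega
    have hek : end_times[k]? = some t := by
      exact (List.getElem?_zip_eq_some.mp hzk).2
    have hgetk : (PySem.List.pyGet? end_times (((k + 1 : Nat) : Int) - 1)).getD 0 = t := by
      have : ((k + 1 : Nat) : Int) - 1 = ((k : Nat) : Int) := by omega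
      rw [this, PySem.List.pyGet?_natCast, hek]
      rfl
    by_cases hc : c = " "
    · by_cases hcu : cur = []
      · subst hcu
        simp only [pwtLoop, pwtW, hc, if_pos rfl, ne_eq, not_true_eq_false, if_neg (by simp : ¬(([] : List String) ≠ []))]
        exact ih (k + 1) words [] lt hrest hk1 (by intro h; exact absurd rfl h)
      · obtain ⟨hk1', hlt⟩ := hcur hcu
        have step : pwtLoop end_times ((c, t) :: rest) k words cur
            = pwtLoop end_times rest (k + 1) (words ++ [(PySem.Str.join "" cur, (PySem.List.pyGet? end_times ((k : Int) - 1)).getD 0)]) [] := by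
          simp [pwtLoop, hc, hcu]
        rw [show pwtW ((c, t) :: rest) cur lt = (PySem.Str.join "" cur, lt) :: pwtW rest [] lt by
          simp [pwtW, hc, hcu]]
        have ihh := ih (k + 1) (words ++ [(PySem.Str.join "" cur, lt)]) [] lt hrest hk1 (by intro h; exact absurd rfl h)
        simp only [step, hlt]
        rw [ihh]
        simp
    · have step : pwtLoop end_times ((c, t) :: rest) k words cur
          = pwtLoop end_times rest (k + 1) words (cur ++ [c]) := by
        simp [pwtLoop, hc]
      rw [show pwtW ((c, t) :: rest) cur lt = pwtW rest (cur ++ [c]) t by simp [pwtW, hc]]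
      have ihh := ih (k + 1) words (cur ++ [c]) t hrest hk1
        (by intro _; exact ⟨by omega, hgetk⟩)
      simp only [step]
      exact ihh

-- ===== VERDICT (by name: the statement is the Claim_ definition above) =====
theorem process_word_timings_spec : Claim_equal_process_word_timings := by
  unfold Claim_equal_process_word_timings
  intro characters end_times _ hpre
  unfold Spec_process_word_timings
  have hlen : characters.length = end_times.length := hpre
  unfold process_word_timings process_word_timings_alt
  have hA := pwtLoop_eq characters end_times hlen (characters.zip end_times) 0 [] [] 0
    (by simp) (by simp) (by intro h; exact absurd rfl h)
  have hB := pwtB_eq characters.length characters end_times (le_refl _) hlen 0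
  split_ifs with h
  · rfl
  · rw [hA, hB]
    simp
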